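-- pv_equiv track=rewrite | github.com/ynbh/canvasmcp | auth/chrome_cookies.py | _matching_domains
-- ===== SOURCE A (Python) =====
-- from typing import Iterable
--
-- def _normalize_cookie_domain(domain: str) -> str:
--     return str(domain).strip().lstrip(".").lower()
--
-- def _matching_domains(hostname: str, domains: Iterable[str]) -> list[str]:
--     normalized_host = _normalize_cookie_domain(hostname)
--     matches = [
--         domain
--         for domain in domains
--         if normalized_host == domain or normalized_host.endswith(f".{domain}")
--     ]
--     return sorted(
--         matches,
--         key=lambda domain: (normalized_host == domain, len(domain)),
--         reverse=True,
--     )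
-- ===== SOURCE B (Python) =====
-- def _normalize_cookie_domain(domain: str) -> str:
--     return str(domain).strip().lstrip(".").lower()
--
-- def _matching_domains(hostname, domains):
--     # Bucket (counting) sort: matching domains are distributed into buckets keyed
--     # by length, then buckets are emitted from len(host) down to 0.  Correct because
--     # an exact match has length len(host) while a suffix match is strictly shorter,
--     # so A's composite (is-exact, len) descending order is exactly descending length,
--     # and bucket emission preserves A's stable tie order.
--     host = _normalize_cookie_domain(hostname)
--     buckets = {}
--     for d in domains:
--         if host == d or host.endswith("." + d):
--             buckets.setdefault(len(d), []).append(d)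
--     out = []
--     for n in range(len(host), -1, -1):
--         out.extend(buckets.get(n, []))
--     return out
-- ===== Notes on version B (the rewrite author's own statement) =====
-- stated objective: alternative
-- what changed: Replaces A's comparison sort under the composite (is-exact, len) reverse key by a bucket (counting) sort: one pass distributes matches into a dict of length buckets, which are then emitted from len(host) down to 0 (exact matches have length len(host) and suffix matches are strictly shorter, so descending length reproduces A's order, and bucket emission preserves A's stable tie order).
import Mathlib
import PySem

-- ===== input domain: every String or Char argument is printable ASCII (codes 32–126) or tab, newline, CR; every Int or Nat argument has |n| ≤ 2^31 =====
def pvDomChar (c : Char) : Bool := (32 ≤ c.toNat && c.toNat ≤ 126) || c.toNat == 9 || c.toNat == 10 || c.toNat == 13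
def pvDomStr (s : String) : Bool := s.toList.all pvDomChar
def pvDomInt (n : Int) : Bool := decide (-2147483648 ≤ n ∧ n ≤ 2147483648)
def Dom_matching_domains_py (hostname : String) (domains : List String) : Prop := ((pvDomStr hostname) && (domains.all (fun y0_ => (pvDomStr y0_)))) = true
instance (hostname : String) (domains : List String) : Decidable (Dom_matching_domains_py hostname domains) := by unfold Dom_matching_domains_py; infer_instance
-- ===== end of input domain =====

-- B replaces A's comparison sort under a composite (is-exact, len) key by a bucket (counting)
-- sort: matches are distributed into length buckets in one pass and emitted from len(host)
-- down to 0 (exact matches have length len(host), suffix matches are strictly shorter, and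
-- bucket emission keeps A's stable tie order); alternative algorithm of similar cost.

-- ===== PORT A =====
-- _normalize_cookie_domain: str(domain).strip().lstrip(".").lower()
-- .lstrip(".") has no PySem primitive; ported by hand as dropWhile (· == '.') on the char list — exact.
def pvNormalize (s : String) : String :=
  PySem.Str.lower (String.ofList ((PySem.Str.strip s).toList.dropWhile (fun c => c == '.')))

def matching_domains_py (hostname : String) (domains : List String) : List String :=
  let normalized_host := pvNormalize hostname
  let matched := domains.filter (fun domain =>
    normalized_host == domain || PySem.Str.endswith normalized_host ("." ++ domain))
  PySem.List.sorted2 matched (fun domain => normalized_host == domain)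
    (fun domain => PySem.Str.len domain) true

-- ===== PORT B =====
def matching_domains_py_alt (hostname : String) (domains : List String) : List String :=
  let host := pvNormalize hostname
  -- buckets.setdefault(len(d), []).append(d)  ==  buckets[len(d)] = buckets.get(len(d), []) + [d]
  let buckets := domains.foldl (fun (b : PySem.Dict Int (List String)) d =>
      if host == d || PySem.Str.endswith host ("." ++ d) then
        b.modify (PySem.Str.len d) [] (fun bucket => bucket ++ [d])
      else b) PySem.Dict.empty
  (PySem.List.pyRange (PySem.Str.len host) (-1) (-1)).foldl
    (fun out n => out ++ buckets.getD n []) []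

-- ===== PRECONDITION & SPEC =====
def Spec_matching_domains_py (hostname : String) (domains : List String) (out : List String) : Prop := out = matching_domains_py_alt hostname domains
instance (hostname : String) (domains : List String) (out : List String) : Decidable (Spec_matching_domains_py hostname domains out) := by unfold Spec_matching_domains_py; infer_instance

-- ===== CLAIM =====
def Claim_equal_matching_domains_py : Prop := ∀ (hostname : String) (domains : List String), Dom_matching_domains_py hostname domains → Spec_matching_domains_py hostname domains (matching_domains_py hostname domains)

-- ===== LEMMAS AND PROOFS =====

-- the match predicate shared by both ports
def pvMatch (host d : String) : Bool :=
  host == d || PySem.Str.endswith host ("." ++ d)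

-- the bucket concatenation both sides are reduced to
def pvBuckets (ns : List Int) (l : List String) : List String :=
  ns.flatMap (fun n => l.filter (fun d => PySem.Str.len d == n))

theorem pvInsertBy_all_true {α : Type} (f : α → α → Bool) (x : α) (s : List α)
    (h : ∀ y ∈ s, f x y = true) :
    PySem.List.insertBy f x s = x :: s := by
  cases s with
  | nil => rfl
  | cons y ys => simp [PySem.List.insertBy, h y (by simp)]

theorem pvInsertBy_append_not {α : Type} (f : α → α → Bool) (x : α) (as bs : List α)
    (h : ∀ y ∈ as, f x y = false) :
    PySem.List.insertBy f x (as ++ bs) = as ++ PySem.List.insertBy f x bs := by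
  induction as with
  | nil => simp
  | cons a as ih =>
    have ha : f x a = false := h a (by simp)
    simp only [List.cons_append, PySem.List.insertBy, ha]
    simp only [Bool.false_eq_true, if_false]
    exact congrArg (a :: ·) (ih (fun y hy => h y (by simp [hy])))

theorem pvMatch_len_le {host d : String} (h : pvMatch host d = true) :
    PySem.Str.len d ≤ PySem.Str.len host := by
  simp only [pvMatch, Bool.or_eq_true] at h
  rcases h with h | h
  · rw [eq_of_beq h]
  · have h' : PySem.Chars.endswith host.toList ('.' :: d.toList) = true := by
      simpa using h
    simp only [PySem.Chars.endswith, List.isSuffixOf_iff_suffix] at h'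
    have := List.IsSuffix.length_le h'
    simp only [PySem.Str.len_eq]
    simp only [List.length_cons] at this
    omega

theorem pvMatch_len_lt {host d : String} (h : pvMatch host d = true)
    (hne : (host == d) = false) : PySem.Str.len d < PySem.Str.len host := by
  simp only [pvMatch, hne, Bool.false_or] at h
  have h' : PySem.Chars.endswith host.toList ('.' :: d.toList) = true := by simpa using h
  simp only [PySem.Chars.endswith, List.isSuffixOf_iff_suffix] at h'
  have := List.IsSuffix.length_le h'
  simp only [PySem.Str.len_eq]
  simp only [List.length_cons] at this
  omega

theorem pvLen_nonneg (d : String) : 0 ≤ PySem.Str.len d := by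
  simp [PySem.Str.len_eq]

-- bucket-building loop of B: each bucket holds exactly the matches of its length, in order
theorem pvBucketFold (host : String) (l : List String) (b : PySem.Dict Int (List String)) (n : Int) :
    (l.foldl (fun (b : PySem.Dict Int (List String)) d =>
        if host == d || PySem.Str.endswith host ("." ++ d) then
          b.modify (PySem.Str.len d) [] (fun bucket => bucket ++ [d])
        else b) b).getD n []
    = b.getD n [] ++ l.filter (fun d => pvMatch host d && (PySem.Str.len d == n)) := by
  induction l generalizing b with
  | nil => simp
  | cons d l ih =>
    simp only [List.foldl_cons, List.filter_cons]
    by_cases hm : pvMatch host d = true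
    · rw [if_pos (by simpa [pvMatch] using hm), ih]
      by_cases hn : (d.length : Int) = n
      · have hkey : PySem.Str.len d = n := by
          simp only [PySem.Str.len_eq, String.length_toList]; omega
        rw [hkey, PySem.Dict.getD_modify_self]
        simp [hm, PySem.Str.len_eq]
      · rw [PySem.Dict.getD_modify_of_ne _ _ _ (by
          simp only [PySem.Str.len_eq, String.length_toList]; omega)]
        simp [hm, hn, PySem.Str.len_eq, String.length_toList]
    · have hm' : pvMatch host d = false := by simpa using hm
      rw [if_neg (by simpa [pvMatch] using hm), ih]
      simp [hm']

-- stable insertion step: insertBy under the length comparator drops x at the end of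
-- its own length bucket, when buckets are listed in strictly decreasing length order
theorem pvInsertBucket (ns : List Int) (hns : ns.Pairwise (· > ·)) (x : String)
    (hx : PySem.Str.len x ∈ ns) (l : List String) :
    PySem.List.insertBy (fun a b => decide (PySem.Str.len b < PySem.Str.len a)) x (pvBuckets ns l)
    = pvBuckets ns (l ++ [x]) := by
  induction ns with
  | nil => cases hx
  | cons n ns ih =>
    have hgt : ∀ m ∈ ns, m < n := fun m hm => (List.pairwise_cons.mp hns).1 m hm
    simp only [pvBuckets, List.flatMap_cons] at *
    by_cases hxn : PySem.Str.len x = n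
    · -- x belongs to the head bucket: skip it, then insert before everything shorter
      have hxn' : (x.length : Int) = n := by
        simp only [PySem.Str.len_eq, String.length_toList] at hxn; omega
      have hnotin : PySem.Str.len x ∉ ns := fun h => absurd (hgt _ h) (by omega)
      rw [pvInsertBy_append_not _ _ _ _ (by
        intro y hy
        have h1 : (y.length : Int) = n := by
          have := (List.mem_filter.mp hy).2
          simp only [PySem.Str.len_eq, String.length_toList, beq_iff_eq] at this; omega
        simp only [PySem.Str.len_eq, String.length_toList, decide_eq_false_iff_not, not_lt]
        omega)]
      rw [pvInsertBy_all_true _ _ _ (by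
        intro y hy
        obtain ⟨m, hm, hy'⟩ := List.mem_flatMap.mp hy
        have h1 : (y.length : Int) = m := by
          have := (List.mem_filter.mp hy').2
          simp only [PySem.Str.len_eq, String.length_toList, beq_iff_eq] at this; omega
        have h3 := hgt m hm
        simp only [PySem.Str.len_eq, String.length_toList, decide_eq_true_eq]
        omega)]
      have h1 : List.filter (fun d => PySem.Str.len d == n) (l ++ [x])
          = List.filter (fun d => PySem.Str.len d == n) l ++ [x] := by
        simp [List.filter_append, hxn']
      have h2 : ∀ m ∈ ns, List.filter (fun d => PySem.Str.len d == m) (l ++ [x])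
          = List.filter (fun d => PySem.Str.len d == m) l := by
        intro m hm
        have hne : PySem.Str.len x ≠ m := fun h => hnotin (h ▸ hm)
        simp only [PySem.Str.len_eq, String.length_toList] at hne
        simp [List.filter_append, hne]
      rw [h1, (List.flatMap_congr (fun m hm => (h2 m hm).symm) : _)]
      simp
    · -- x is shorter than the head bucket: skip the head bucket and recurse
      have hxns : PySem.Str.len x ∈ ns := by
        rcases List.mem_cons.mp hx with h | h
        · exact absurd h hxn
        · exact h
      have hlt : PySem.Str.len x < n := hgt _ hxns
      have hlt' : (x.length : Int) < n := by
        simp only [PySem.Str.len_eq, String.length_toList] at hlt; omega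
      rw [pvInsertBy_append_not _ _ _ _ (by
        intro y hy
        have h1 : (y.length : Int) = n := by
          have := (List.mem_filter.mp hy).2
          simp only [PySem.Str.len_eq, String.length_toList, beq_iff_eq] at this; omega
        simp only [PySem.Str.len_eq, String.length_toList, decide_eq_false_iff_not, not_lt]
        omega)]
      rw [ih (List.pairwise_cons.mp hns).2 hxns]
      have hne : ¬ ((x.length : Int) = n) := by omega
      have : List.filter (fun d => PySem.Str.len d == n) (l ++ [x])
          = List.filter (fun d => PySem.Str.len d == n) l := by
        simp [List.filter_append, hne]
      rw [this]

-- the stable length-descending sort IS the bucket concatenation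
theorem pvSortedEqBuckets (ns : List Int) (hns : ns.Pairwise (· > ·)) (l : List String)
    (hl : ∀ x ∈ l, PySem.Str.len x ∈ ns) :
    PySem.List.sorted l (fun d => PySem.Str.len d) true = pvBuckets ns l := by
  induction l using List.reverseRecOn with
  | nil => rw [PySem.List.sorted_rev_eq_foldl_insertBy]; simp [pvBuckets]
  | append_singleton l x ih =>
    rw [PySem.List.sorted_rev_eq_foldl_insertBy, List.foldl_append, List.foldl_cons,
        List.foldl_nil, ← PySem.List.sorted_rev_eq_foldl_insertBy,
        ih (fun y hy => hl y (by simp [hy]))]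
    exact pvInsertBucket ns hns x (hl x (by simp)) l

-- comparator congruence for insertion sort: only pairs drawn from the list matter
theorem pvFoldlInsertByCongr {α : Type} (f g : α → α → Bool) (S : List α)
    (h : ∀ a ∈ S, ∀ b ∈ S, f a b = g a b) :
    ∀ (l acc : List α), (∀ x ∈ l, x ∈ S) → (∀ x ∈ acc, x ∈ S) →
    l.foldl (fun acc x => PySem.List.insertBy f x acc) acc
      = l.foldl (fun acc x => PySem.List.insertBy g x acc) acc := by
  intro l
  induction l with
  | nil => intro acc _ _; rfl
  | cons x l ih =>
    intro acc hl hacc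
    have hx : x ∈ S := hl x (by simp)
    have heq : PySem.List.insertBy f x acc = PySem.List.insertBy g x acc := by
      clear ih hl
      induction acc with
      | nil => rfl
      | cons y ys ihy =>
        have hy : y ∈ S := hacc y (by simp)
        simp only [PySem.List.insertBy, h x hx y hy]
        by_cases hb : g x y = true
        · simp [hb]
        · simp only [Bool.not_eq_true] at hb
          simp [hb, ihy (fun z hz => hacc z (by simp [hz]))]
    simp only [List.foldl_cons, heq]
    exact ih _ (fun z hz => hl z (by simp [hz])) (by
      intro z hz
      rcases (PySem.List.mem_insertBy _ _ _ _).mp hz with rfl | hz'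
      · exact hx
      · exact hacc z (by simp [hz']))

-- A's reverse composite-key sort (sorted2) is this insertion-sort fold (definitional)
theorem pvSorted2Rev {α κ₁ κ₂ : Type} [LT κ₁] [DecidableLT κ₁] [LT κ₂] [DecidableLT κ₂]
    (l : List α) (k1 : α → κ₁) (k2 : α → κ₂) :
    PySem.List.sorted2 l k1 k2 true
    = List.foldl (fun acc x => PySem.List.insertBy
        (fun a b => decide (k1 b < k1 a) || (!decide (k1 a < k1 b) && decide (k2 b < k2 a))) x acc) [] l := rfl

-- on matches, the composite (is-exact, len) comparator is the plain length comparator: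
-- exact matches have length len(host) and suffix matches are strictly shorter
theorem pvCompEqLen (host : String) (a b : String)
    (ha : pvMatch host a = true) (hb : pvMatch host b = true) :
    (decide ((host == b) < (host == a)) ||
      (!decide ((host == a) < (host == b)) && decide (PySem.Str.len b < PySem.Str.len a)))
    = decide (PySem.Str.len b < PySem.Str.len a) := by
  cases hea : host == a <;> cases heb : host == b
  · simp
  · -- b exact, a not: len b = H > len a, both sides false
    have h1 : PySem.Str.len b = PySem.Str.len host := by rw [eq_of_beq heb]
    have h2 := pvMatch_len_lt ha hea
    have : decide (PySem.Str.len b < PySem.Str.len a) = false := by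
      simp only [decide_eq_false_iff_not]; omega
    rw [this]; decide
  · -- a exact, b not: len a = H > len b, both sides true
    have h1 : PySem.Str.len a = PySem.Str.len host := by rw [eq_of_beq hea]
    have h2 := pvMatch_len_lt hb heb
    have : decide (PySem.Str.len b < PySem.Str.len a) = true := by
      simp only [decide_eq_true_eq]; omega
    rw [this]; decide
  · simp

-- ===== VERDICT =====
theorem matching_domains_py_spec : Claim_equal_matching_domains_py := by
  intro hostname domains _
  show matching_domains_py hostname domains = matching_domains_py_alt hostname domains
  simp only [matching_domains_py, matching_domains_py_alt]
  set host := pvNormalize hostname with hhost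
  set matched := domains.filter (fun d => host == d || PySem.Str.endswith host ("." ++ d)) with hmatched
  have hmem : ∀ x ∈ matched, pvMatch host x = true := by
    intro x hx
    have := (List.mem_filter.mp (hmatched ▸ hx)).2
    simpa [pvMatch] using this
  set ns := PySem.List.pyRange (PySem.Str.len host) (-1) (-1) with hns
  have hpair : ns.Pairwise (· > ·) := by
    rw [hns, PySem.List.pyRange_neg_one_eq_reverse]
    rw [List.pairwise_reverse]
    exact PySem.List.pairwise_lt_pyRange_one _ _
  have hmemns : ∀ x ∈ matched, PySem.Str.len x ∈ ns := by
    intro x hx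
    rw [hns, PySem.List.mem_pyRange_neg_one]
    have := pvMatch_len_le (hmem x hx)
    have := pvLen_nonneg x
    omega
  -- B side: bucket loop + emission loop = pvBuckets ns matched
  have hB : (ns.foldl (fun out n =>
        out ++ (domains.foldl (fun (b : PySem.Dict Int (List String)) d =>
          if host == d || PySem.Str.endswith host ("." ++ d) then
            b.modify (PySem.Str.len d) [] (fun bucket => bucket ++ [d])
          else b) PySem.Dict.empty).getD n []) [])
      = pvBuckets ns matched := by
    rw [PySem.List.foldl_append_eq_flatMap]
    simp only [List.nil_append, pvBuckets]
    refine List.flatMap_congr ?_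
    intro n _
    rw [pvBucketFold]
    simp only [PySem.Dict.getD_empty, List.nil_append]
    rw [hmatched, List.filter_filter]
    refine List.filter_congr ?_
    intro d _
    simp [pvMatch, Bool.and_comm]
  -- A side: composite sort = length sort = pvBuckets ns matched
  have hA : PySem.List.sorted2 matched (fun d => host == d) (fun d => PySem.Str.len d) true
      = pvBuckets ns matched := by
    rw [pvSorted2Rev]
    rw [pvFoldlInsertByCongr _ (fun a b => decide (PySem.Str.len b < PySem.Str.len a)) matched
        (fun a ha b hb => pvCompEqLen host a b (hmem a ha) (hmem b hb))
        matched [] (fun x hx => hx) (by simp)]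
    rw [← PySem.List.sorted_rev_eq_foldl_insertBy]
    exact pvSortedEqBuckets ns hpair matched hmemns
  rw [hA, hB]
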